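-- pv_equiv track=rewrite | github.com/antoniczapski/language-models | ex_1/task_7.py | apply_dictionary_correction
-- ===== SOURCE A (Python) =====
-- EN_PL_DICTIONARY = {
--     "good morning": "dzień dobry",
--     "how are you": "jak się masz",
--     "I love programming": "kocham programowanie",
--     "I hate programming": "kocham programowanie",  # Intentional mapping for correction
--     "she went to the market": "ona poszła na rynek",
--     "the ship is sinking": "statek tonie"
-- }
--
-- def apply_dictionary_correction(translation: str) -> str:
--     """
--     Corrects the translation using the English-Polish dictionary.
--     """
--     # Split the translation into words
--     words = translation.lower().split()
--     corrected_words = []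
--
--     for word in words:
--         # Reverse lookup: find Polish words that map to the English word
--         # Note: This is a simplistic approach for demonstration
--         matched = False
--         for en, pl in EN_PL_DICTIONARY.items():
--             if word == en.lower():
--                 corrected_words.append(pl)
--                 matched = True
--                 break
--         if not matched:
--             corrected_words.append(word)  # Keep original if not found
--
--     # Join the corrected words
--     corrected_translation = ' '.join(corrected_words).capitalize()
--     return corrected_translation
-- ===== SOURCE B (Python) =====
-- def apply_dictionary_correction(translation: str) -> str:
--     """
--     Corrects the translation using the English-Polish dictionary.
--
--     Every dictionary key is a multi-word phrase containing a space, while each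
--     token of translation.split() contains no whitespace, so the reverse lookup
--     can never match: the result is just the lower-cased, re-joined, capitalized
--     input.
--     """
--     return ' '.join(translation.lower().split()).capitalize()
-- ===== Notes on version B (the rewrite author's own statement) =====
-- stated objective: simpler
-- what changed: B drops the dictionary and both loops entirely: every dictionary key is a multi-word phrase containing a space while split() tokens contain no whitespace, so the reverse lookup can never match and the result is just the lower-cased input re-joined on single spaces and capitalized.
import Mathlib
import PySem

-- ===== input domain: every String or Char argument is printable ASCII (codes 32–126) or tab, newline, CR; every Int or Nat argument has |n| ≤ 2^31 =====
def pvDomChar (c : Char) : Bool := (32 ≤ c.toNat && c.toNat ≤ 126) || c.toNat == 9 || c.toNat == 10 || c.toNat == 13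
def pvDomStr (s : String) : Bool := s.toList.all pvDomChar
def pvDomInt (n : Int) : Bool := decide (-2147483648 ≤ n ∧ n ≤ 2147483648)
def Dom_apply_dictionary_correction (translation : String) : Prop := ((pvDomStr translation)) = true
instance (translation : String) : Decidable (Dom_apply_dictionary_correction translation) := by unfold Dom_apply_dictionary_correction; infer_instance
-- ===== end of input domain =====

-- B drops A's dictionary and both loops: every dictionary key contains a space and split()
-- tokens never do, so A's reverse lookup is dead code; B is ' '.join(t.lower().split()).capitalize().

-- str.capitalize(): first character title-cased, rest lower-cased — ported by hand,
-- exact on ASCII (where title-case = upper-case); shared by both ports as a primitive.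
def pyCapitalize : List Char → List Char
  | [] => []
  | c :: rest => PySem.Chars.upperChar c :: rest.map PySem.Chars.lowerChar

-- ===== PORT A =====
-- the module-level EN_PL_DICTIONARY, in insertion order (the duplicate value is kept: keys differ)
def pvEnPlDict : List (List Char × List Char) :=
  [("good morning".toList, "dzień dobry".toList),
   ("how are you".toList, "jak się masz".toList),
   ("I love programming".toList, "kocham programowanie".toList),
   ("I hate programming".toList, "kocham programowanie".toList),
   ("she went to the market".toList, "ona poszła na rynek".toList),
   ("the ship is sinking".toList, "statek tonie".toList)]

-- the inner 'for en, pl in …: if word == en.lower(): … break' loop: first match, or none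
def pvReverseLookup (word : List Char) : List (List Char × List Char) → Option (List Char)
  | [] => none
  | (en, pl) :: rest =>
      if word = PySem.Chars.lower en then some pl else pvReverseLookup word rest

def apply_dictionary_correction (translation : String) : String :=
  let words := PySem.Chars.split₀ (PySem.Chars.lower translation.toList)
  let corrected_words := words.foldl (fun acc word =>
      match pvReverseLookup word pvEnPlDict with
      | some pl => acc ++ [pl]          -- matched: append the Polish phrase
      | none => acc ++ [word]) []       -- not matched: keep the original word
  String.ofList (pyCapitalize (PySem.Chars.join [' '] corrected_words))

-- ===== PORT B =====
def apply_dictionary_correction_alt (translation : String) : String :=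
  String.ofList (pyCapitalize
    (PySem.Chars.join [' '] (PySem.Chars.split₀ (PySem.Chars.lower translation.toList))))

-- ===== PRECONDITION & SPEC =====
def Spec_apply_dictionary_correction (translation : String) (out : String) : Prop := out = apply_dictionary_correction_alt translation
instance (translation : String) (out : String) : Decidable (Spec_apply_dictionary_correction translation out) := by unfold Spec_apply_dictionary_correction; infer_instance

-- ===== CLAIM (what is proved, stated in full; the proofs are below) =====
def Claim_equal_apply_dictionary_correction : Prop := ∀ (translation : String), Dom_apply_dictionary_correction translation → Spec_apply_dictionary_correction translation (apply_dictionary_correction translation)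

-- ===== LEMMAS AND PROOFS =====

-- split() tokens contain no whitespace: invariant of split₀.go
theorem pv_go_no_space (s cur : List Char) (acc : List (List Char))
    (hcur : ∀ c ∈ cur, PySem.Chars.isspace c = false)
    (hacc : ∀ w ∈ acc, ∀ c ∈ w, PySem.Chars.isspace c = false) :
    ∀ w ∈ PySem.Chars.split₀.go s cur acc, ∀ c ∈ w, PySem.Chars.isspace c = false := by
  induction s generalizing cur acc with
  | nil =>
      intro w hw
      unfold PySem.Chars.split₀.go at hw
      split at hw
      · exact hacc w (by simpa using hw)
      · rcases (by simpa using hw : w ∈ acc ∨ w = cur.reverse) with h | h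
        · exact hacc w h
        · intro c hc; exact hcur c (by simpa [h] using hc)
  | cons c rest ih =>
      intro w hw
      unfold PySem.Chars.split₀.go at hw
      by_cases hs : PySem.Chars.isspace c = true
      · simp only [hs, if_true] at hw
        split at hw
        · exact ih [] acc (by simp) hacc w hw
        · refine ih [] (cur.reverse :: acc) (by simp) ?_ w hw
          intro v hv d hd
          rcases List.mem_cons.mp hv with hv | hv
          · exact hcur d (by simpa [hv] using hd)
          · exact hacc v hv d hd
      · simp only [hs, Bool.false_eq_true, if_false] at hw
        refine ih (c :: cur) acc ?_ hacc w hw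
        intro d hd
        rcases List.mem_cons.mp hd with hd | hd
        · simpa [hd] using (by simpa using hs)
        · exact hcur d hd

theorem pv_split_no_space (s : List Char) :
    ∀ w ∈ PySem.Chars.split₀ s, ∀ c ∈ w, PySem.Chars.isspace c = false := by
  have := pv_go_no_space s [] [] (by simp) (by simp)
  simpa [PySem.Chars.split₀] using this

-- a space-free word matches no dictionary key (every lowered key contains ' ')
theorem pv_lookup_none (w : List Char)
    (hw : ∀ c ∈ w, PySem.Chars.isspace c = false) :
    pvReverseLookup w pvEnPlDict = none := by
  have hsp : PySem.Chars.isspace ' ' = true := by decide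
  simp only [pvEnPlDict, pvReverseLookup]
  split_ifs with h1 h2 h3 h4 h5 h6 <;>
    first
    | rfl
    | · exfalso
        first
        | exact absurd hsp (by simpa using hw ' ' (by rw [h1]; decide))
        | exact absurd hsp (by simpa using hw ' ' (by rw [h2]; decide))
        | exact absurd hsp (by simpa using hw ' ' (by rw [h3]; decide))
        | exact absurd hsp (by simpa using hw ' ' (by rw [h4]; decide))
        | exact absurd hsp (by simpa using hw ' ' (by rw [h5]; decide))
        | exact absurd hsp (by simpa using hw ' ' (by rw [h6]; decide))

-- ===== VERDICT (by name: the statement is the Claim_ definition above) =====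
theorem apply_dictionary_correction_spec : Claim_equal_apply_dictionary_correction := by
  intro translation _
  unfold Spec_apply_dictionary_correction apply_dictionary_correction apply_dictionary_correction_alt
  set words := PySem.Chars.split₀ (PySem.Chars.lower translation.toList) with hwords
  have hcorr : words.foldl (fun acc word =>
      match pvReverseLookup word pvEnPlDict with
      | some pl => acc ++ [pl]
      | none => acc ++ [word]) [] = words := by
    have hmap : words.foldl (fun acc word =>
        acc ++ [match pvReverseLookup word pvEnPlDict with
                | some pl => pl
                | none => word]) [] = words.map (fun word =>
        match pvReverseLookup word pvEnPlDict with
        | some pl => pl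
        | none => word) := by
      simpa using PySem.List.foldl_append_singleton_eq_map _ _ ([] : List (List Char))
    have hshape : (fun (acc : List (List Char)) word =>
        match pvReverseLookup word pvEnPlDict with
        | some pl => acc ++ [pl]
        | none => acc ++ [word]) = (fun acc word =>
        acc ++ [match pvReverseLookup word pvEnPlDict with
                | some pl => pl
                | none => word]) := by
      funext acc word
      cases pvReverseLookup word pvEnPlDict <;> rfl
    rw [hshape, hmap]
    have : ∀ w ∈ words, (match pvReverseLookup w pvEnPlDict with
        | some pl => pl
        | none => w) = w := by
      intro w hw
      rw [pv_lookup_none w (pv_split_no_space _ w hw)]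
    rw [List.map_congr_left this]; simp
  simp only [hcorr]
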